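-- pv_equiv track=rewrite | github.com/amartyaj/Python_Practice | Code/Practice_4_02272025.py | find_num_unique_islands
-- ===== SOURCE A (Python) =====
-- def find_num_unique_islands(grid):
--     if not grid:
--         return 0
--
--     rows, cols = len(grid), len(grid[0])
--     num_islands = 0
--     unique_islands = set()
--
--     def dfs(row, col, origin_row, origin_col, shape):
--         if row < 0 or row >= rows or col < 0 or col >= cols or grid[row][col] == 0:
--             return
--
--         # Mark the cell as visited
--         grid[row][col] = 0
--
--         # Record the relative position of the cell with respect to the origin
--         shape.add((row - origin_row, col - origin_col))
--
--         # Explore all 8 neighbors (horizontal, vertical, and diagonal)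
--         for i in range(-1, 2):
--             for j in range(-1, 2):
--                 if i == 0 and j == 0:
--                     continue
--                 dfs(row + i, col + j, origin_row, origin_col, shape)
--
--     for r in range(rows):
--         for c in range(cols):
--             if grid[r][c] == 1:
--                 # Initialize a set to store the shape of the current island
--                 shape = set()
--                 dfs(r, c, r, c, shape)
--
--                 # Add the shape to the set of unique islands
--                 unique_islands.add(frozenset(shape))
--                 num_islands += 1
--
--     return (num_islands, len(unique_islands))
-- ===== SOURCE B (Python) =====
-- def find_num_unique_islands(grid):
--     # Iterative re-implementation: the recursive dfs is replaced by an explicit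
--     # LIFO stack (neighbours pushed in reverse so pop order matches the recursion).
--     # Like the original, this zeroes visited cells of grid in place.
--     if not grid:
--         return 0
--
--     rows, cols = len(grid), len(grid[0])
--     num_islands = 0
--     unique_islands = set()
--
--     for r in range(rows):
--         for c in range(cols):
--             if grid[r][c] == 1:
--                 shape = set()
--                 stack = [(r, c)]
--                 while stack:
--                     row, col = stack.pop()
--                     if row < 0 or row >= rows or col < 0 or col >= cols or grid[row][col] == 0:
--                         continue
--                     grid[row][col] = 0
--                     shape.add((row - r, col - c))
--                     for i in (1, 0, -1):
--                         for j in (1, 0, -1):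
--                             if i == 0 and j == 0:
--                                 continue
--                             stack.append((row + i, col + j))
--                 num_islands += 1
--                 unique_islands.add(frozenset(shape))
--
--     return (num_islands, len(unique_islands))
-- ===== Notes on version B (the rewrite author's own statement) =====
-- stated objective: alternative
-- what changed: The recursive 8-neighbour dfs (call stack, early returns) is replaced by an iterative flood fill with an explicit LIFO stack that pops a cell, guards it, zeroes it and pushes its eight neighbours; the outer scan is kept.
-- outside the precondition, e.g. on find_num_unique_islands([]): A returns 0, B returns 0
import Mathlib
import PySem

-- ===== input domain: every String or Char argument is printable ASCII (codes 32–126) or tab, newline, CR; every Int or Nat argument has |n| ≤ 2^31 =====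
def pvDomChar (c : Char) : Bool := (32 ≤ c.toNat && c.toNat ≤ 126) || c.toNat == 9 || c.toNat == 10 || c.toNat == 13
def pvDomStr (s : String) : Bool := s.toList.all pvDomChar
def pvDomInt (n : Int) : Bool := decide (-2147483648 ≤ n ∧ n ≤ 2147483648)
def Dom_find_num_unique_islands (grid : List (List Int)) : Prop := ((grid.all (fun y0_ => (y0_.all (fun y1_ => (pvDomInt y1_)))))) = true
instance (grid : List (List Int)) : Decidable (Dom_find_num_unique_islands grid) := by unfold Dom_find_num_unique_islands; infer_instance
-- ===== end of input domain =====

-- B replaces the recursive dfs by an explicit LIFO stack (same traversal order);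
-- objective: alternative/idiomatic decomposition, same cost. Both A and B zero the
-- visited cells of `grid` in place in Python; the equivalence proved here is about
-- the return value (the mutation happens to be identical as well).

-- ===== PORT A =====
-- shared small helpers (exact transliterations of the Python primitives involved)
def pvGetCell (g : List (List Int)) (r c : Int) : Int :=
  -- grid[r][c]; only consulted behind the 0 ≤ r < rows, 0 ≤ c < cols guard
  (g.getD r.toNat []).getD c.toNat 0

def pvSetCell (g : List (List Int)) (r c : Int) : List (List Int) :=
  -- grid[r][c] = 0
  g.set r.toNat ((g.getD r.toNat []).set c.toNat 0)

def pvShapeAdd (sh : List (Int × Int)) (p : Int × Int) : List (Int × Int) :=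
  -- shape.add(p): Python set, insertion order
  if sh.contains p then sh else sh ++ [p]

def pvSameSet (a b : List (Int × Int)) : Bool :=
  -- frozenset equality on distinct-element lists
  a.all (fun x => b.contains x) && b.all (fun x => a.contains x)

def pvAddUnique (u : List (List (Int × Int))) (sh : List (Int × Int)) :
    List (List (Int × Int)) :=
  -- unique_islands.add(frozenset(shape))
  if u.any (fun t => pvSameSet t sh) then u else u ++ [sh]

def pvCountRow (row : List Int) : Nat := (row.filter (fun x => x != 0)).length
def pvCountNZ (g : List (List Int)) : Nat := (g.map pvCountRow).sum

def pvFinish (st : List (List Int) × Int × List (List (Int × Int))) : Int × Int :=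
  (st.2.1, (st.2.2.length : Int))

-- the 9 (i, j) pairs of A's nested 'for i in range(-1,2): for j in range(-1,2)'
def pvDeltas : List (Int × Int) :=
  ([-1, 0, 1] : List Int).flatMap (fun i => ([-1, 0, 1] : List Int).map (fun j => (i, j)))

-- A's recursive dfs; the Nat argument is pure fuel (a totality guard, always
-- called with pvCountNZ g + 1, which the proofs show is sufficient)
def pvDfsA (rows cols : Int) :
    Nat → Int → Int → Int → Int → List (List Int) → List (Int × Int) →
    List (List Int) × List (Int × Int)
  | 0, _, _, _, _, g, sh => (g, sh)
  | fuel + 1, r, c, orr, oc, g, sh =>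
    if r < 0 || rows ≤ r || c < 0 || cols ≤ c || pvGetCell g r c == 0 then (g, sh)
    else
      pvDeltas.foldl
        (fun st d =>
          if d.1 == 0 && d.2 == 0 then st
          else pvDfsA rows cols fuel (r + d.1) (c + d.2) orr oc st.1 st.2)
        (pvSetCell g r c, pvShapeAdd sh (r - orr, c - oc))

-- body of A's inner 'for c in range(cols)' loop
def pvInnerA (rows cols : Int) (r : Nat)
    (st : List (List Int) × Int × List (List (Int × Int))) (c : Nat) :
    List (List Int) × Int × List (List (Int × Int)) :=
  if pvGetCell st.1 (r : Int) (c : Int) == 1 then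
    let p := pvDfsA rows cols (pvCountNZ st.1 + 1) (r : Int) (c : Int) (r : Int) (c : Int) st.1 []
    (p.1, st.2.1 + 1, pvAddUnique st.2.2 p.2)
  else st

def find_num_unique_islands (grid : List (List Int)) : Int × Int :=
  -- Python returns the bare int 0 on an empty grid (not a pair); Pre_ excludes that input
  if grid = [] then (0, 0)
  else
    pvFinish
      ((List.range grid.length).foldl
        (fun st r =>
          (List.range (grid.headD []).length).foldl
            (pvInnerA (grid.length : Int) ((grid.headD []).length : Int) r) st)
        (grid, ((0 : Int), ([] : List (List (Int × Int))))))

-- ===== PORT B =====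
-- neighbours in the order the Python stack pops them (B pushes them reversed,
-- so with the Lean list head as top of stack the new stack is pvNbrs r c ++ rest)
def pvNbrs (r c : Int) : List (Int × Int) :=
  pvDeltas.foldr
    (fun d acc => if d.1 == 0 && d.2 == 0 then acc else (r + d.1, c + d.2) :: acc) []

-- lemma needed by pvBfsB's termination argument (proof at the bottom would be too late)
theorem pvCountRow_set_lt (row : List Int) (j : Nat) (h : row.getD j 0 ≠ 0) :
    pvCountRow (row.set j 0) < pvCountRow row := by
  induction row generalizing j with
  | nil => simp [List.getD] at h
  | cons a tl ih =>
    cases j with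
    | zero =>
      simp only [List.getD_cons_zero] at h
      simp [pvCountRow, h]
    | succ j =>
      simp only [List.getD_cons_succ] at h
      have := ih j h
      simp only [List.set_cons_succ, pvCountRow, List.filter_cons]
      split <;> simpa using this

theorem pvCountNZ_setCell_lt (g : List (List Int)) (r c : Int)
    (h : pvGetCell g r c ≠ 0) : pvCountNZ (pvSetCell g r c) < pvCountNZ g := by
  unfold pvGetCell pvSetCell at *
  generalize r.toNat = i at *
  induction g generalizing i with
  | nil => simp [List.getD] at h
  | cons row tl ih =>
    cases i with
    | zero =>
      simp only [List.getD_cons_zero] at h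
      have := pvCountRow_set_lt row c.toNat h
      simp only [List.getD_cons_zero, List.set_cons_zero, pvCountNZ, List.map_cons, List.sum_cons]
      omega
    | succ i =>
      simp only [List.getD_cons_succ] at h
      have := ih i h
      simp only [List.getD_cons_succ, List.set_cons_succ, pvCountNZ, List.map_cons, List.sum_cons] at this ⊢
      omega

-- B's while-stack loop (head of the list = top of the Python stack)
def pvBfsB (rows cols orr oc : Int) :
    List (Int × Int) → List (List Int) → List (Int × Int) →
    List (List Int) × List (Int × Int)
  | [], g, sh => (g, sh)
  | (r, c) :: rest, g, sh =>
    if h : r < 0 || rows ≤ r || c < 0 || cols ≤ c || pvGetCell g r c == 0 then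
      pvBfsB rows cols orr oc rest g sh
    else
      pvBfsB rows cols orr oc (pvNbrs r c ++ rest) (pvSetCell g r c)
        (pvShapeAdd sh (r - orr, c - oc))
  termination_by stack g _ => (pvCountNZ g, stack.length)
  decreasing_by
  · apply Prod.Lex.right
    simp
  · apply Prod.Lex.left
    apply pvCountNZ_setCell_lt
    intro h0
    simp [h0] at h

-- body of B's inner 'for c in range(cols)' loop
def pvInnerB (rows cols : Int) (r : Nat)
    (st : List (List Int) × Int × List (List (Int × Int))) (c : Nat) :
    List (List Int) × Int × List (List (Int × Int)) :=
  if pvGetCell st.1 (r : Int) (c : Int) == 1 then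
    let p := pvBfsB rows cols (r : Int) (c : Int) [((r : Int), (c : Int))] st.1 []
    (p.1, st.2.1 + 1, pvAddUnique st.2.2 p.2)
  else st

def find_num_unique_islands_alt (grid : List (List Int)) : Int × Int :=
  if grid = [] then (0, 0)
  else
    pvFinish
      ((List.range grid.length).foldl
        (fun st r =>
          (List.range (grid.headD []).length).foldl
            (pvInnerB (grid.length : Int) ((grid.headD []).length : Int) r) st)
        (grid, ((0 : Int), ([] : List (List (Int × Int))))))

-- ===== PRECONDITION & SPEC =====
-- Pre_ excludes (a) the empty grid, where Python A returns the bare int 0 rather than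
-- a pair, and (b) ragged grids with a row shorter than the first row, where Python A
-- raises IndexError while scanning; nothing else is excluded.
def Pre_find_num_unique_islands (grid : List (List Int)) : Prop :=
  grid ≠ [] ∧ ∀ row ∈ grid, (grid.headD []).length ≤ row.length
instance (grid : List (List Int)) : Decidable (Pre_find_num_unique_islands grid) := by
  unfold Pre_find_num_unique_islands; infer_instance

def pvWitness_find_num_unique_islands : List (List Int) := [[1, 0], [0, 1]]

def Spec_find_num_unique_islands (grid : List (List Int)) (out : Int × Int) : Prop :=
  out = find_num_unique_islands_alt grid
instance (grid : List (List Int)) (out : Int × Int) :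
    Decidable (Spec_find_num_unique_islands grid out) := by
  unfold Spec_find_num_unique_islands; infer_instance

-- ===== CLAIM (what is proved, stated in full; the proofs are below) =====
def Claim_equal_find_num_unique_islands : Prop :=
  ∀ (grid : List (List Int)), Dom_find_num_unique_islands grid →
    Pre_find_num_unique_islands grid →
    Spec_find_num_unique_islands grid (find_num_unique_islands grid)

-- ===== LEMMAS AND PROOFS =====

theorem pvFoldl_mono
    (F : (List (List Int) × List (Int × Int)) → (Int × Int) →
      List (List Int) × List (Int × Int))
    (hF : ∀ st d, pvCountNZ (F st d).1 ≤ pvCountNZ st.1) :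
    ∀ (ds : List (Int × Int)) st, pvCountNZ (ds.foldl F st).1 ≤ pvCountNZ st.1 := by
  intro ds
  induction ds with
  | nil => intro st; simp
  | cons d ds ih => intro st; exact le_trans (ih (F st d)) (hF st d)

theorem pvDfsA_mono (rows cols : Int) :
    ∀ (fuel : Nat) (r c orr oc : Int) g sh,
      pvCountNZ (pvDfsA rows cols fuel r c orr oc g sh).1 ≤ pvCountNZ g := by
  intro fuel
  induction fuel with
  | zero => intro r c orr oc g sh; simp [pvDfsA]
  | succ f ih =>
    intro r c orr oc g sh
    simp only [pvDfsA]
    split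
    · exact le_refl _
    · rename_i hlive
      refine le_trans
        (pvFoldl_mono _ (fun st d => ?_) pvDeltas (pvSetCell g r c, pvShapeAdd sh (r - orr, c - oc))) ?_
      · dsimp only
        split
        · exact le_refl _
        · exact ih _ _ _ _ _ _
      · have hne : pvGetCell g r c ≠ 0 := by
          intro h0; simp [h0] at hlive
        exact le_of_lt (pvCountNZ_setCell_lt g r c hne)

theorem pvBfs_eq_dfs (rows cols orr oc : Int) :
    ∀ (fuel : Nat) (g : List (List Int)) (sh : List (Int × Int))
      (rest : List (Int × Int)) (r c : Int),
      pvCountNZ g < fuel →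
      pvBfsB rows cols orr oc ((r, c) :: rest) g sh =
        pvBfsB rows cols orr oc rest
          (pvDfsA rows cols fuel r c orr oc g sh).1
          (pvDfsA rows cols fuel r c orr oc g sh).2 := by
  intro fuel
  induction fuel with
  | zero => intro g sh rest r c h; omega
  | succ f ih =>
    intro g sh rest r c hlt
    by_cases hdead : (r < 0 || rows ≤ r || c < 0 || cols ≤ c || pvGetCell g r c == 0) = true
    · simp [pvBfsB, pvDfsA, hdead]
    · have hne : pvGetCell g r c ≠ 0 := by
        intro h0; simp [h0] at hdead
      have hlt' : pvCountNZ (pvSetCell g r c) < f := by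
        have := pvCountNZ_setCell_lt g r c hne
        omega
      have hL : pvBfsB rows cols orr oc ((r, c) :: rest) g sh =
          pvBfsB rows cols orr oc (pvNbrs r c ++ rest) (pvSetCell g r c)
            (pvShapeAdd sh (r - orr, c - oc)) := by
        rw [pvBfsB]
        simp [hdead]
      have hR : pvDfsA rows cols (f + 1) r c orr oc g sh =
          pvDeltas.foldl
            (fun st d =>
              if d.1 == 0 && d.2 == 0 then st
              else pvDfsA rows cols f (r + d.1) (c + d.2) orr oc st.1 st.2)
            (pvSetCell g r c, pvShapeAdd sh (r - orr, c - oc)) := by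
        rw [pvDfsA]
        simp [hdead]
      rw [hL, hR]
      have sub : ∀ (ds : List (Int × Int)) (g1 : List (List Int))
          (sh1 : List (Int × Int)) (rest1 : List (Int × Int)),
          pvCountNZ g1 < f →
          pvBfsB rows cols orr oc
            ((ds.foldr (fun d acc =>
                if d.1 == 0 && d.2 == 0 then acc else (r + d.1, c + d.2) :: acc) []) ++ rest1)
            g1 sh1 =
          pvBfsB rows cols orr oc rest1
            (ds.foldl (fun st d =>
              if d.1 == 0 && d.2 == 0 then st
              else pvDfsA rows cols f (r + d.1) (c + d.2) orr oc st.1 st.2) (g1, sh1)).1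
            (ds.foldl (fun st d =>
              if d.1 == 0 && d.2 == 0 then st
              else pvDfsA rows cols f (r + d.1) (c + d.2) orr oc st.1 st.2) (g1, sh1)).2 := by
        intro ds
        induction ds with
        | nil => intro g1 sh1 rest1 _; simp
        | cons d ds ihds =>
          intro g1 sh1 rest1 hg1
          by_cases hskip : (d.1 == 0 && d.2 == 0) = true
          · simp only [List.foldr_cons, List.foldl_cons, hskip, if_pos]
            exact ihds g1 sh1 rest1 hg1
          · simp only [List.foldr_cons, List.foldl_cons, hskip, if_neg,
              Bool.not_eq_true]
            rw [List.cons_append]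
            rw [ih g1 sh1 _ (r + d.1) (c + d.2) hg1]
            have hmono := pvDfsA_mono rows cols f (r + d.1) (c + d.2) orr oc g1 sh1
            have := ihds (pvDfsA rows cols f (r + d.1) (c + d.2) orr oc g1 sh1).1
              (pvDfsA rows cols f (r + d.1) (c + d.2) orr oc g1 sh1).2 rest1 (by omega)
            simpa using this
      have := sub pvDeltas (pvSetCell g r c) (pvShapeAdd sh (r - orr, c - oc)) rest hlt'
      simpa [pvNbrs] using this

theorem pvInner_eq : pvInnerA = pvInnerB := by
  funext rows cols r st c
  unfold pvInnerA pvInnerB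
  split
  · have h := pvBfs_eq_dfs rows cols (r : Int) (c : Int) (pvCountNZ st.1 + 1) st.1 []
      [] (r : Int) (c : Int) (Nat.lt_succ_self _)
    rw [h]
    simp [pvBfsB]
  · rfl

-- ===== VERDICT (by name: the statement is the Claim_ definition above) =====
theorem find_num_unique_islands_spec : Claim_equal_find_num_unique_islands := by
  intro grid _dom _pre
  unfold Spec_find_num_unique_islands find_num_unique_islands find_num_unique_islands_alt
  rw [pvInner_eq]
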